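-- pv_equiv track=rewrite | github.com/CallMeChewy/PikaPeek | Scripts/Deployment/UpdateFiles.py | IsAlreadyPascalCase
-- ===== SOURCE A (Python) =====
-- def IsAlreadyPascalCase(Text: str) -> bool:
--     """
--     Check if text is already in acceptable PascalCase format.
--     Returns True if the text should be preserved as-is.
--     """
--     # Must start with uppercase letter
--     if not Text or not Text[0].isupper():
--         return False
--
--     # Must be all alphanumeric
--     if not Text.isalnum():
--         return False
--
--     # Check for reasonable PascalCase pattern:
--     # - Starts with uppercase
--     # - Has at least one more uppercase letter (indicating word boundaries)
--     # - No consecutive uppercase letters (avoid ALL_CAPS)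
--     uppercase_count = sum(1 for c in Text if c.isupper())
--
--     # If it's all one word (like "Script"), allow it
--     if len(Text) <= 8 and uppercase_count == 1:
--         return True
--
--     # For longer names, require multiple uppercase letters (PascalCase pattern)
--     # but not too many (avoid ALLCAPS)
--     if uppercase_count >= 2 and uppercase_count <= len(Text) // 2:
--         # Check for consecutive uppercase (avoid "XMLHTTPRequest" style)
--         consecutive_upper = any(Text[i].isupper() and Text[i+1].isupper()
--                                for i in range(len(Text)-1))
--         if not consecutive_upper:
--             return True
--
--     return False
-- ===== SOURCE B (Python) =====
-- def IsAlreadyPascalCase(Text: str) -> bool: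
--     """Word-segmentation view: split Text into maximal words starting at each
--     uppercase letter, then judge the shape of the word list (each word alnum,
--     word count in bounds, every non-final word at least two chars long)."""
--     if not Text or not Text[0].isupper():
--         return False
--     words = []
--     cur = Text[0]
--     for c in Text[1:]:
--         if c.isupper():
--             words.append(cur)
--             cur = c
--         else:
--             cur += c
--     words.append(cur)
--     if any(not w.isalnum() for w in words):
--         return False
--     if len(Text) <= 8 and len(words) == 1:
--         return True
--     return 2 <= len(words) <= len(Text) // 2 and all(len(w) >= 2 for w in words[:-1])
-- ===== Notes on version B (the rewrite author's own statement) =====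
-- stated objective: alternative
-- what changed: B tokenizes the string into a list of words (maximal segments starting at each uppercase letter) and judges the word list's shape - every word alphanumeric, word count within the 1/2..n//2 thresholds, every non-final word at least two characters - instead of A's character-level scans counting uppercase letters and testing adjacent uppercase pairs.
import Mathlib
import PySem

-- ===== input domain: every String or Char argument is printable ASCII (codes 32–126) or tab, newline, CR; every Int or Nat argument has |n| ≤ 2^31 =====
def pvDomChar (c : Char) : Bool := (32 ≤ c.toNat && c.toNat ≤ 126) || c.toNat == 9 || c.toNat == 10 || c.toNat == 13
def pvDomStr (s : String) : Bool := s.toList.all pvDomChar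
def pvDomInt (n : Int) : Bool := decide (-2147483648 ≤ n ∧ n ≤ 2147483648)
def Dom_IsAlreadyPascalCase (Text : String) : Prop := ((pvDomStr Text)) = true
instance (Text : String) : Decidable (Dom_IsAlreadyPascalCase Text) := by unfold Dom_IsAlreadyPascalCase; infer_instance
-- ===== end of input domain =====

-- B tokenizes the string into words (segments starting at each uppercase letter) and judges
-- the word list's shape instead of A's character-level counting and adjacent-pair scans.

-- ===== PORT A =====
def IsAlreadyPascalCase (Text : String) : Bool :=
  let cs := Text.toList
  match cs with
  | [] => false
  | c0 :: _ =>
    if !PySem.Chars.isupper c0 then false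
    else if !PySem.Str.strIsalnum Text then false
    else
      let ucount := cs.foldl (fun n c => if PySem.Chars.isupper c then n + 1 else n) (0 : Nat)
      if cs.length ≤ 8 && ucount == 1 then true
      else if 2 ≤ ucount && ucount ≤ cs.length / 2 then
        !((List.range (cs.length - 1)).any (fun i =>
            PySem.Chars.isupper (cs.getD i ' ') && PySem.Chars.isupper (cs.getD (i + 1) ' ')))
      else false

-- ===== PORT B =====
-- loop body of B's word-splitting pass: state is (finished words, current word)
def pvWordsStep (st : List (List Char) × List Char) (c : Char) : List (List Char) × List Char :=
  if PySem.Chars.isupper c then (st.1 ++ [st.2], [c]) else (st.1, st.2 ++ [c])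

def IsAlreadyPascalCase_alt (Text : String) : Bool :=
  match Text.toList with
  | [] => false
  | c0 :: rest =>
    if !PySem.Chars.isupper c0 then false
    else
      let st := rest.foldl pvWordsStep ([], [c0])
      let words := st.1 ++ [st.2]
      if words.any (fun w => !PySem.Chars.strIsalnum w) then false
      else if (c0 :: rest).length ≤ 8 && words.length == 1 then true
      else
        (2 ≤ words.length && words.length ≤ (c0 :: rest).length / 2) &&
          words.dropLast.all (fun w => 2 ≤ w.length)

-- ===== PRECONDITION & SPEC =====
def Spec_IsAlreadyPascalCase (Text : String) (out : Bool) : Prop := out = IsAlreadyPascalCase_alt Text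
instance (Text : String) (out : Bool) : Decidable (Spec_IsAlreadyPascalCase Text out) := by unfold Spec_IsAlreadyPascalCase; infer_instance

-- ===== CLAIM (what is proved, stated in full; the proofs are below) =====
def Claim_equal_IsAlreadyPascalCase : Prop := ∀ (Text : String), Dom_IsAlreadyPascalCase Text → Spec_IsAlreadyPascalCase Text (IsAlreadyPascalCase Text)

-- ===== LEMMAS AND PROOFS =====

-- recursive specification of B's word-splitting loop
def pvWordsRec (cur : List Char) : List Char → List (List Char)
  | [] => [cur]
  | c :: r => if PySem.Chars.isupper c then cur :: pvWordsRec [c] r else pvWordsRec (cur ++ [c]) r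

-- "some adjacent pair is both uppercase", threaded with the previous char's uppercase status
def pvChain (prev : Bool) : List Char → Bool
  | [] => false
  | c :: r => (prev && PySem.Chars.isupper c) || pvChain (PySem.Chars.isupper c) r

lemma pvFold_eq_rec (l : List Char) : ∀ (ws : List (List Char)) (cur : List Char),
    (l.foldl pvWordsStep (ws, cur)).1 ++ [(l.foldl pvWordsStep (ws, cur)).2]
      = ws ++ pvWordsRec cur l := by
  induction l with
  | nil => simp [pvWordsRec]
  | cons c r ih =>
    intro ws cur
    by_cases h : PySem.Chars.isupper c = true <;>
      simp [pvWordsStep, pvWordsRec, h, ih]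

lemma pvWordsRec_ne_nil (l : List Char) : ∀ cur, pvWordsRec cur l ≠ [] := by
  induction l with
  | nil => intro cur; simp [pvWordsRec]
  | cons c r ih =>
    intro cur
    by_cases h : PySem.Chars.isupper c = true <;> simp [pvWordsRec, h, ih]

lemma pvWordsRec_length (l : List Char) : ∀ cur,
    (pvWordsRec cur l).length = 1 + l.countP (fun c => PySem.Chars.isupper c) := by
  induction l with
  | nil => intro cur; simp [pvWordsRec]
  | cons c r ih =>
    intro cur
    by_cases h : PySem.Chars.isupper c = true <;>
      simp [pvWordsRec, h, ih, Nat.add_comm, Nat.add_left_comm]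

lemma pvWordsRec_alnum (l : List Char) : ∀ cur, cur ≠ [] →
    ((pvWordsRec cur l).any (fun w => !PySem.Chars.strIsalnum w))
      = !((cur ++ l).all PySem.Chars.isalnum) := by
  induction l with
  | nil =>
    intro cur hc
    cases cur with
    | nil => exact absurd rfl hc
    | cons a t => simp [pvWordsRec, PySem.Chars.strIsalnum]
  | cons c r ih =>
    intro cur hc
    by_cases h : PySem.Chars.isupper c = true
    · have hcur : PySem.Chars.strIsalnum cur = cur.all PySem.Chars.isalnum := by
        cases cur with
        | nil => exact absurd rfl hc
        | cons a t => simp [PySem.Chars.strIsalnum]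
      simp only [pvWordsRec, h, if_true, List.any_cons]
      rw [hcur, ih [c] (by simp)]
      simp [Bool.not_and]
    · simp only [pvWordsRec, h]
      rw [if_neg (by simp [h]), ih (cur ++ [c]) (by simp)]
      simp

lemma pvWordsRec_chain (l : List Char) : ∀ cur : List Char, cur ≠ [] →
    pvChain (decide (cur.length = 1)) l
      = !((pvWordsRec cur l).dropLast.all (fun w => 2 ≤ w.length)) := by
  induction l with
  | nil => intro cur _; simp [pvWordsRec, pvChain]
  | cons c r ih =>
    intro cur hc
    by_cases h : PySem.Chars.isupper c = true
    · have hne := pvWordsRec_ne_nil r [c]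
      have ih1 := ih [c] (by simp)
      simp only [List.length_singleton, decide_true] at ih1
      simp only [pvWordsRec, pvChain, h, if_true, List.dropLast_cons_of_ne_nil hne,
        List.all_cons, ih1, Bool.and_true]
      have hlen : 1 ≤ cur.length := List.length_pos_iff.mpr hc
      by_cases h2 : 2 ≤ cur.length
      · have hd : decide (cur.length = 1) = false := by simp; omega
        simp [hd, h2]
      · have h1 : cur.length = 1 := by omega
        simp [h1]
    · simp only [pvWordsRec, h, pvChain]
      rw [if_neg (by simp [h])]
      have ih1 := ih (cur ++ [c]) (by simp)
      have hd : decide ((cur ++ [c]).length = 1) = false := by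
        have hlen : 1 ≤ cur.length := List.length_pos_iff.mpr hc
        simp; omega
      rw [hd] at ih1
      rw [← ih1]
      simp

lemma pvCount_spec (l : List Char) : ∀ (n : Nat),
    l.foldl (fun n c => if PySem.Chars.isupper c then n + 1 else n) n =
      n + l.countP (fun c => PySem.Chars.isupper c) := by
  induction l with
  | nil => simp
  | cons c r ih =>
    intro n
    by_cases hu : PySem.Chars.isupper c = true <;>
      simp [hu, ih, Nat.add_comm, Nat.add_left_comm]

lemma pvRangeAny (c : Char) (l : List Char) :
    ((List.range l.length).any (fun i =>
        PySem.Chars.isupper ((c :: l)[i]?.getD ' ') &&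
        PySem.Chars.isupper (l[i]?.getD ' '))) = pvChain (PySem.Chars.isupper c) l := by
  induction l generalizing c with
  | nil => simp [pvChain]
  | cons d r ih =>
    rw [show (d :: r).length = r.length + 1 from rfl, List.range_succ_eq_map]
    simp only [List.any_cons, List.any_map, Function.comp_def, pvChain]
    congr 1
    exact ih d

lemma pvStrIsalnum (Text : String) :
    PySem.Str.strIsalnum Text =
      (!Text.toList.isEmpty && Text.toList.all PySem.Chars.isalnum) := by
  rw [PySem.Str.strIsalnum_eq]
  cases Text.toList with
  | nil => rfl
  | cons c r => simp [PySem.Chars.strIsalnum]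

lemma pvFinal (len8 eq1 ge2 le2 allw : Bool) :
    (if (len8 && eq1) = true then true else if (ge2 && le2) = true then allw else false)
      = (if (len8 && eq1) = true then true else (ge2 && le2) && allw) := by
  cases len8 <;> cases eq1 <;> cases ge2 <;> cases le2 <;> cases allw <;> rfl

-- ===== VERDICT (by name: the statement is the Claim_ definition above) =====
theorem IsAlreadyPascalCase_spec : Claim_equal_IsAlreadyPascalCase := by
  intro Text _
  unfold Spec_IsAlreadyPascalCase IsAlreadyPascalCase IsAlreadyPascalCase_alt
  cases h : Text.toList with
  | nil => rfl
  | cons c0 rest =>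
    simp only [pvStrIsalnum, h, List.isEmpty_cons, Bool.not_false, Bool.true_and]
    by_cases h0 : PySem.Chars.isupper c0 = true
    · have hw : (rest.foldl pvWordsStep ([], [c0])).1 ++ [(rest.foldl pvWordsStep ([], [c0])).2]
          = pvWordsRec [c0] rest := by
        simpa using pvFold_eq_rec rest [] [c0]
      simp only [h0, Bool.not_true, Bool.false_eq_true, if_false, hw,
        pvWordsRec_alnum rest [c0] (by simp), List.cons_append, List.nil_append]
      by_cases hal : ((c0 :: rest).all PySem.Chars.isalnum) = true
      · simp only [hal, Bool.not_true, Bool.false_eq_true, if_false,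
          List.foldl_cons, h0, pvCount_spec, pvWordsRec_length,
          List.getD_eq_getElem?_getD, List.getElem?_cons_succ,
          show (c0 :: rest).length - 1 = rest.length from rfl]
        rw [pvRangeAny, h0]
        have hch := pvWordsRec_chain rest [c0] (by simp)
        simp only [List.length_singleton, decide_true] at hch
        rw [hch, pvFinal]
        cases ((pvWordsRec [c0] rest).dropLast.all (fun w => 2 ≤ w.length))  <;> simp
        rfl
      · simp [hal]
    · simp [h0]
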